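-- pv_equiv track=rewrite | github.com/pone-software/hyperion | train_net.py | make_funnel
-- ===== SOURCE A (Python) =====
-- def make_funnel(max_neurons, layer_count):
--     """Create a neuron per layer list for a funnel shape."""
--     layers = []
--     out_feat = 7
--     previous = max_neurons
--     layers.append(max_neurons)
--     step_size = int((previous - out_feat) / (layer_count))
--     step_size = max(0, step_size)
--     for _ in range(layer_count - 1):
--         previous = previous - step_size
--         layers.append(previous)
--     return layers
-- ===== SOURCE B (Python) =====
-- def make_funnel(max_neurons, layer_count):
--     """Create a neuron per layer list for a funnel shape."""
--     step_size = max(0, int((max_neurons - 7) / layer_count))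
--     return [max_neurons - i * step_size for i in range(max(1, layer_count))]
-- ===== Notes on version B (the rewrite author's own statement) =====
-- stated objective: simpler
-- what changed: Replaces A's accumulator loop (repeated subtraction into `previous` appended to a growing list) with a direct closed-form list comprehension max_neurons - i*step_size over range(max(1, layer_count)); the division is kept first so layer_count == 0 still raises ZeroDivisionError, which Pre_ excludes.
import Mathlib
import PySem

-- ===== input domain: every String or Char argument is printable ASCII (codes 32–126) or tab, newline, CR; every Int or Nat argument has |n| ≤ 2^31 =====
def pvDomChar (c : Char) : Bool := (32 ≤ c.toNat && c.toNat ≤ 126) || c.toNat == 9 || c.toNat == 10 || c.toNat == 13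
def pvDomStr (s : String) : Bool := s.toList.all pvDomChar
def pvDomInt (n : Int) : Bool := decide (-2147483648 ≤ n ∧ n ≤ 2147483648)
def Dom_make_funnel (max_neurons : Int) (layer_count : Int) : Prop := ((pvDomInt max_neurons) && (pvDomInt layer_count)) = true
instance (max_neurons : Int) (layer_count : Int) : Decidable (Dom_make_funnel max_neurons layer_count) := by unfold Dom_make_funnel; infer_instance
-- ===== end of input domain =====

-- B replaces A's accumulator loop with a closed-form comprehension max_neurons - i*step_size (objective: simpler).

-- ===== PORT A =====
-- int((previous - out_feat) / layer_count) is float true division truncated toward zero;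
-- on Dom (|ints| ≤ 2^31) the float quotient is exact enough that this equals Int.tdiv.
def make_funnel (max_neurons : Int) (layer_count : Int) : List Int :=
  let layers : List Int := []
  let out_feat : Int := 7
  let previous : Int := max_neurons
  let layers := layers ++ [max_neurons]
  let step_size := Int.tdiv (previous - out_feat) layer_count
  let step_size := max 0 step_size
  let st := (PySem.List.pyRange 0 (layer_count - 1) 1).foldl
    (fun (st : List Int × Int) _ =>
      let previous := st.2 - step_size
      (st.1 ++ [previous], previous)) (layers, previous)
  st.1

-- ===== PORT B =====
def make_funnel_alt (max_neurons : Int) (layer_count : Int) : List Int :=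
  let step_size := max 0 (Int.tdiv (max_neurons - 7) layer_count)
  (PySem.List.pyRange 0 (max 1 layer_count) 1).map (fun i => max_neurons - i * step_size)

-- ===== PRECONDITION & SPEC =====
-- A raises ZeroDivisionError at layer_count = 0 (B raises there too); excluded.
def Pre_make_funnel (max_neurons : Int) (layer_count : Int) : Prop := layer_count ≠ 0
instance (max_neurons : Int) (layer_count : Int) : Decidable (Pre_make_funnel max_neurons layer_count) := by unfold Pre_make_funnel; infer_instance
def pvWitness_make_funnel : Int × Int := (100, 5)

def Spec_make_funnel (max_neurons : Int) (layer_count : Int) (out : List Int) : Prop := out = make_funnel_alt max_neurons layer_count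
instance (max_neurons : Int) (layer_count : Int) (out : List Int) : Decidable (Spec_make_funnel max_neurons layer_count out) := by unfold Spec_make_funnel; infer_instance

-- ===== CLAIM (what is proved, stated in full; the proofs are below) =====
def Claim_equal_make_funnel : Prop := ∀ (max_neurons : Int) (layer_count : Int), Dom_make_funnel max_neurons layer_count → Pre_make_funnel max_neurons layer_count → Spec_make_funnel max_neurons layer_count (make_funnel max_neurons layer_count)

-- ===== LEMMAS AND PROOFS =====

-- The loop body ignores the range element, so the fold only depends on the list's length.
theorem fold_ignore {α β γ : Type} (f : γ → γ) :
    ∀ (xs : List α) (ys : List β), xs.length = ys.length → ∀ (init : γ),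
      xs.foldl (fun c _ => f c) init = ys.foldl (fun c _ => f c) init := by
  intro xs
  induction xs with
  | nil => intro ys h init; cases ys with
    | nil => rfl
    | cons y ys => simp at h
  | cons x xs ih => intro ys h init; cases ys with
    | nil => simp at h
    | cons y ys =>
      simp only [List.foldl_cons]
      exact ih ys (by simpa using h) (f init)

-- Invariant of A's loop after n iterations.
theorem loop_invariant (m s : Int) (n : Nat) :
    (List.range n).foldl
      (fun (st : List Int × Int) _ => (st.1 ++ [st.2 - s], st.2 - s)) ([m], m)
    = ((List.range (n + 1)).map (fun i : Nat => m - (i : Int) * s), m - (n : Int) * s) := by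
  induction n with
  | zero => simp
  | succ n ih =>
    rw [List.range_succ, List.foldl_append, ih]
    simp only [List.foldl_cons, List.foldl_nil, Prod.mk.injEq]
    refine ⟨?_, by push_cast; ring⟩
    rw [List.range_succ (n := n + 1), List.map_append]
    congr 1
    simp only [List.map_cons, List.map_nil]
    congr 1
    push_cast
    ring

-- ===== VERDICT (by name: the statement is the Claim_ definition above) =====
theorem make_funnel_spec : Claim_equal_make_funnel := by
  intro m l _ _
  unfold Spec_make_funnel make_funnel make_funnel_alt
  simp only []
  set s := max 0 (Int.tdiv (m - 7) l) with hs
  have hfold :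
      (PySem.List.pyRange 0 (l - 1) 1).foldl
        (fun (st : List Int × Int) _ => (st.1 ++ [st.2 - s], st.2 - s)) ([m], m)
      = (List.range ((l - 1).toNat)).foldl
        (fun (st : List Int × Int) _ => (st.1 ++ [st.2 - s], st.2 - s)) ([m], m) := by
    exact fold_ignore _ _ _ (by simp [PySem.List.length_pyRange_one]) _
  have hmax : (max 1 l).toNat = (l - 1).toNat + 1 := by omega
  calc ((PySem.List.pyRange 0 (l - 1) 1).foldl
        (fun (st : List Int × Int) _ => (st.1 ++ [st.2 - s], st.2 - s)) ([m], m)).1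
      = (List.range ((l - 1).toNat + 1)).map (fun i : Nat => m - (i : Int) * s) := by
        rw [hfold, loop_invariant]
    _ = (PySem.List.pyRange 0 (max 1 l) 1).map (fun i => m - i * s) := by
        rw [PySem.List.pyRange_one, List.map_map]
        have h0 : (max 1 l - 0).toNat = (l - 1).toNat + 1 := by omega
        rw [h0]
        refine List.map_congr_left fun k _ => ?_
        simp
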